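-- pv_equiv track=rewrite | github.com/AbrARM017/Algoritmica_PRA1 | practica_1.py | generar_filas_validas
-- ===== SOURCE A (Python) =====
-- from typing import List, Tuple, Optional, Generator
--
-- def es_valida_posicion(posicion: int, chico: str, enemigo: str, amigo: str,
--                        fila_actual: List[str]) -> bool:
--     """
--     Verifica si un chico puede estar en una posición específica de la fila.
--     Un chico puede estar en una posición si:
--     1. No ve a su enemigo detrás de él (o su amigo está antes que su enemigo)
--     """
--     # Si es la primera posición, siempre es válida
--     if posicion == 0:
--         return True
--
--     # Buscar las posiciones del enemigo y amigo en la fila actual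
--     enemigo_pos = -1
--     amigo_pos = -1
--
--     for i, otro_chico in enumerate(fila_actual):
--         if otro_chico == enemigo:
--             enemigo_pos = i
--         if otro_chico == amigo:
--             amigo_pos = i
--
--     # Si el enemigo no está en la fila actual, no hay problema
--     if enemigo_pos == -1:
--         return True
--
--     # Si el enemigo está detrás del chico actual, necesitamos verificar
--     # si el amigo está antes que el enemigo
--     if enemigo_pos > posicion:
--         # Si el amigo no está en la fila actual, no es válido
--         if amigo_pos == -1:
--             return False
--         # Si el amigo está después del enemigo o después de la posición actual, no es válido
--         if amigo_pos > enemigo_pos or amigo_pos > posicion: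
--             return False
--
--     return True
--
-- def generar_filas_validas(relaciones: List[Tuple[str, str, str]]) -> Generator[List[str], None, None]:
--     """
--     Genera todas las filas válidas según las condiciones del problema.
--     Usa un enfoque iterativo con una pila para explorar el espacio de soluciones.
--     """
--     if not relaciones:
--         yield []
--         return
--
--     # Crear diccionarios para acceder rápidamente a los enemigos y amigos
--     chicos = [relacion[0] for relacion in relaciones]
--     enemigos = {relacion[0]: relacion[1] for relacion in relaciones}
--     amigos = {relacion[0]: relacion[2] for relacion in relaciones}
--
--     # Inicializar la pila con un estado vacío
--     stack = [([], set())]  # (fila_actual, chicos_usados)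
--
--     while stack:
--         fila_actual, chicos_usados = stack.pop()
--
--         # Si ya hemos colocado a todos los chicos, tenemos una solución
--         if len(fila_actual) == len(chicos):
--             yield fila_actual
--             continue
--
--         posicion = len(fila_actual)
--
--         # Intentar añadir cada chico no utilizado a la fila actual
--         for chico in chicos:
--             if chico not in chicos_usados:
--                 # Verificar si el chico puede estar en esta posición
--                 if es_valida_posicion(posicion, chico, enemigos[chico], amigos[chico], fila_actual):
--                     # Añadir este chico a la fila y continuar con el siguiente nivel
--                     nueva_fila = fila_actual + [chico]
--                     nuevos_usados = chicos_usados.union({chico})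
--                     stack.append((nueva_fila, nuevos_usados))
-- ===== SOURCE B (Python) =====
-- from typing import List, Tuple, Generator
--
-- def es_valida_posicion(posicion: int, chico: str, enemigo: str, amigo: str,
--                        fila_actual: List[str]) -> bool:
--     if posicion == 0:
--         return True
--     enemigo_pos = -1
--     amigo_pos = -1
--     for i, otro_chico in enumerate(fila_actual):
--         if otro_chico == enemigo:
--             enemigo_pos = i
--         if otro_chico == amigo:
--             amigo_pos = i
--     if enemigo_pos == -1:
--         return True
--     if enemigo_pos > posicion:
--         if amigo_pos == -1:
--             return False
--         if amigo_pos > enemigo_pos or amigo_pos > posicion: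
--             return False
--     return True
--
-- def generar_filas_validas(relaciones: List[Tuple[str, str, str]]) -> Generator[List[str], None, None]:
--     """Recursive backtracking instead of an explicit stack; iterates candidates in
--     reversed order, which reproduces the LIFO emission order of the stack version."""
--     if not relaciones:
--         yield []
--         return
--     chicos = [r[0] for r in relaciones]
--     enemigos = {r[0]: r[1] for r in relaciones}
--     amigos = {r[0]: r[2] for r in relaciones}
--
--     def rec(fila, usados):
--         if len(fila) == len(chicos):
--             yield fila
--             return
--         pos = len(fila)
--         for chico in reversed(chicos):
--             if chico not in usados and es_valida_posicion(pos, chico, enemigos[chico], amigos[chico], fila):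
--                 yield from rec(fila + [chico], usados | {chico})
--
--     yield from rec([], set())
-- ===== Notes on version B (the rewrite author's own statement) =====
-- stated objective: simpler
-- what changed: Replaces the explicit stack-driven while loop (manual LIFO state management) by direct recursive backtracking that yields solutions as it recurses, iterating candidates in reversed order to emit solutions in the same order.
import Mathlib
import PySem

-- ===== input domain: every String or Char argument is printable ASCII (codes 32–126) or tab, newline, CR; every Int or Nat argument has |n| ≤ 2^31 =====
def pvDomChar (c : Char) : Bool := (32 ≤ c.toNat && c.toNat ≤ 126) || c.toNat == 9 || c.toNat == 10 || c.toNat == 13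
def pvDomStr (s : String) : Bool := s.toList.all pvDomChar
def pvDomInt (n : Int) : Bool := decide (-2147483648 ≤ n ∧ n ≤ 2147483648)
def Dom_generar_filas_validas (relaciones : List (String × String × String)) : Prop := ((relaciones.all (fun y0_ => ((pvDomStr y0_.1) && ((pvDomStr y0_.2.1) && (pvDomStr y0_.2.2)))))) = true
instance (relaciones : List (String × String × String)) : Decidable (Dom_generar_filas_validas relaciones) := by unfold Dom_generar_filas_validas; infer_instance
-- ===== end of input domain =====

-- B replaces A's explicit stack-driven while loop by recursive backtracking over reversed candidates; same outputs in the same order (objective: simpler).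


-- ===== PORT A =====
-- shared helper: Source B contains this exact same function verbatim
def es_valida_posicion (posicion : Int) (_chico enemigo amigo : String)
    (fila_actual : List String) : Bool :=
  if posicion == 0 then true
  else
    -- the enumerate loop computing enemigo_pos / amigo_pos (both start at -1)
    let ep := (PySem.List.enumerate fila_actual).foldl
      (fun (p : Int × Int) (ic : Int × String) =>
        ((if ic.2 == enemigo then ic.1 else p.1),
         (if ic.2 == amigo then ic.1 else p.2))) ((-1 : Int), (-1 : Int))
    if ep.1 == -1 then true
    else if ep.1 > posicion then
      if ep.2 == -1 then false
      else if ep.2 > ep.1 || ep.2 > posicion then false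
      else true
    else true

-- A's `while stack:` loop; the stack's TOP is the list head (pop = head, append = cons).
-- `fuel` is only a totality guard; `pvFuelA` below always suffices (proved in the lemmas).
def pvLoopA (chicos : List String) (enemigos amigos : PySem.Dict String String) :
    Nat → List (List String × PySem.Set String) → List (List String)
  | 0, _ => []
  | _ + 1, [] => []
  | fuel + 1, (fila_actual, chicos_usados) :: rest =>
    if fila_actual.length == chicos.length then
      fila_actual :: pvLoopA chicos enemigos amigos fuel rest
    else
      pvLoopA chicos enemigos amigos fuel
        (chicos.foldl (fun st chico =>
          if chicos_usados.contains chico = false then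
            if es_valida_posicion (fila_actual.length : Int) chico
                (enemigos.getD chico "") (amigos.getD chico "") fila_actual then
              (fila_actual ++ [chico], PySem.Set.union chicos_usados [chico]) :: st
            else st
          else st) rest)

def pvFuelA (chicos : List String) : Nat := (chicos.length + 1) ^ chicos.length

def generar_filas_validas (relaciones : List (String × String × String)) : List (List String) :=
  if relaciones.isEmpty then [[]]
  else
    let chicos := relaciones.map (fun r => r.1)
    let enemigos := relaciones.foldl (fun d r => d.insert r.1 r.2.1) PySem.Dict.empty
    let amigos := relaciones.foldl (fun d r => d.insert r.1 r.2.2) PySem.Dict.empty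
    pvLoopA chicos enemigos amigos (pvFuelA chicos) [([], PySem.Set.empty)]

-- ===== PORT B =====
-- termination fact cited by pvRecB's decreasing_by
theorem pvFilter_union_lt (chicos : List String) (usados : PySem.Set String) (c : String)
    (hmem : c ∈ chicos) (hc : usados.contains c = false) :
    (chicos.filter (fun x => !((PySem.Set.union usados [c]).contains x))).length
      < (chicos.filter (fun x => !(usados.contains x))).length := by
  have hcn : c ∉ usados := by simpa using hc
  have hu : PySem.Set.union usados [c] = usados ++ [c] := by
    simp [PySem.Set.union, PySem.Set.update, PySem.Set.add, hcn]
  have hfe : chicos.filter (fun x => !((usados ++ [c]).contains x))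
      = (chicos.filter (fun x => !(usados.contains x))).filter (fun x => !(x == c)) := by
    rw [List.filter_filter]
    apply List.filter_congr
    intro x _
    by_cases h1 : x ∈ usados <;> by_cases h2 : x = c <;> simp_all
  rw [hu, hfe, List.length_filter_lt_length_iff_exists]
  exact ⟨c, by simp [List.mem_filter, hmem, hcn], by simp⟩

-- B's inner generator rec(fila, usados): yield fila when complete, else recurse over reversed(chicos)
def pvRecB (chicos : List String) (enemigos amigos : PySem.Dict String String)
    (fila : List String) (usados : PySem.Set String) : List (List String) :=
  if fila.length == chicos.length then [fila]
  else
    chicos.reverse.attach.foldl (fun acc c =>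
      if h : usados.contains c.1 = false ∧
          es_valida_posicion (fila.length : Int) c.1
            (enemigos.getD c.1 "") (amigos.getD c.1 "") fila = true then
        acc ++ pvRecB chicos enemigos amigos (fila ++ [c.1]) (PySem.Set.union usados [c.1])
      else acc) []
termination_by (chicos.filter (fun x => !(usados.contains x))).length
decreasing_by
  exact pvFilter_union_lt chicos usados c.1 (List.mem_reverse.mp c.2) h.1

def generar_filas_validas_alt (relaciones : List (String × String × String)) : List (List String) :=
  if relaciones.isEmpty then [[]]
  else
    let chicos := relaciones.map (fun r => r.1)
    let enemigos := relaciones.foldl (fun d r => d.insert r.1 r.2.1) PySem.Dict.empty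
    let amigos := relaciones.foldl (fun d r => d.insert r.1 r.2.2) PySem.Dict.empty
    pvRecB chicos enemigos amigos [] PySem.Set.empty

-- ===== PRECONDITION & SPEC =====
def Spec_generar_filas_validas (relaciones : List (String × String × String)) (out : List (List String)) : Prop := out = generar_filas_validas_alt relaciones
instance (relaciones : List (String × String × String)) (out : List (List String)) : Decidable (Spec_generar_filas_validas relaciones out) := by unfold Spec_generar_filas_validas; infer_instance

-- ===== CLAIM (what is proved, stated in full; the proofs are below) =====
def Claim_equal_generar_filas_validas : Prop := ∀ (relaciones : List (String × String × String)), Dom_generar_filas_validas relaciones → Spec_generar_filas_validas relaciones (generar_filas_validas relaciones)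

-- ===== LEMMAS AND PROOFS =====

-- the candidate test shared by both loop bodies
def pvOk (enemigos amigos : PySem.Dict String String) (fila : List String)
    (usados : PySem.Set String) (c : String) : Bool :=
  !(usados.contains c) &&
    es_valida_posicion (fila.length : Int) c (enemigos.getD c "") (amigos.getD c "") fila

def pvMk (fila : List String) (usados : PySem.Set String) (c : String) :
    List String × PySem.Set String :=
  (fila ++ [c], PySem.Set.union usados [c])

theorem pvFoldl_cons_rev {α β : Type} (l : List α) (f : α → β) (init : List β) :
    l.foldl (fun st c => f c :: st) init = (l.map f).reverse ++ init := by
  induction l generalizing init <;> simp [*]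

-- A's inner for-loop pushes exactly the valid candidates, last on top
theorem pvPushA (chicos : List String) (enemigos amigos : PySem.Dict String String)
    (fila : List String) (usados : PySem.Set String)
    (rest : List (List String × PySem.Set String)) :
    chicos.foldl (fun st chico =>
        if usados.contains chico = false then
          if es_valida_posicion (fila.length : Int) chico
              (enemigos.getD chico "") (amigos.getD chico "") fila then
            (fila ++ [chico], PySem.Set.union usados [chico]) :: st
          else st
        else st) rest
      = ((chicos.filter (pvOk enemigos amigos fila usados)).map (pvMk fila usados)).reverse ++ rest := by
  have h1 : (fun (st : List (List String × PySem.Set String)) chico =>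
        if usados.contains chico = false then
          if es_valida_posicion (fila.length : Int) chico
              (enemigos.getD chico "") (amigos.getD chico "") fila then
            (fila ++ [chico], PySem.Set.union usados [chico]) :: st
          else st
        else st)
      = (fun st c => if pvOk enemigos amigos fila usados c then pvMk fila usados c :: st else st) := by
    funext st c
    by_cases hu : usados.contains c <;>
      by_cases hv : es_valida_posicion (fila.length : Int) c
        (enemigos.getD c "") (amigos.getD c "") fila <;>
      simp [pvOk, pvMk, hv]
  rw [h1, PySem.List.foldl_if_eq_foldl_filter, pvFoldl_cons_rev]

theorem pvRecB_complete (chicos : List String) (enemigos amigos : PySem.Dict String String)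
    (fila : List String) (usados : PySem.Set String)
    (h : fila.length = chicos.length) :
    pvRecB chicos enemigos amigos fila usados = [fila] := by
  rw [pvRecB]
  simp [h]

theorem pvRecB_incomplete (chicos : List String) (enemigos amigos : PySem.Dict String String)
    (fila : List String) (usados : PySem.Set String)
    (h : ¬ fila.length = chicos.length) :
    pvRecB chicos enemigos amigos fila usados
      = ((chicos.filter (pvOk enemigos amigos fila usados)).reverse).flatMap
          (fun c => pvRecB chicos enemigos amigos (fila ++ [c]) (PySem.Set.union usados [c])) := by
  rw [pvRecB]
  simp only [beq_iff_eq, h, if_false, dite_eq_ite]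
  rw [List.foldl_attach (l := chicos.reverse)
    (f := fun acc c =>
      if usados.contains c = false ∧
          es_valida_posicion (fila.length : Int) c
            (enemigos.getD c "") (amigos.getD c "") fila = true then
        acc ++ pvRecB chicos enemigos amigos (fila ++ [c]) (PySem.Set.union usados [c])
      else acc)]
  simp only [PySem.List.foldl_ite_eq_foldl_filter, PySem.List.foldl_append_eq_flatMap,
    List.nil_append]
  rw [← List.filter_reverse]
  congr 1
  apply List.filter_congr
  intro x _
  simp [pvOk]

-- two small list facts the weight argument needs
theorem pvLength_filter_le_filter {α : Type} (l : List α) (p q : α → Bool)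
    (h : ∀ a ∈ l, p a → q a) : (l.filter p).length ≤ (l.filter q).length := by
  induction l with
  | nil => simp
  | cons a t ih =>
    have ih' := ih (fun x hx hp => h x (List.mem_cons_of_mem a hx) hp)
    by_cases hp : p a
    · rw [List.filter_cons_of_pos hp, List.filter_cons_of_pos (h a (by simp) hp)]
      simpa using ih'
    · rw [List.filter_cons_of_neg hp]
      by_cases hq : q a
      · rw [List.filter_cons_of_pos hq]; simp; omega
      · rw [List.filter_cons_of_neg hq]; exact ih'

theorem pvSum_le_mul (l : List Nat) (n : Nat) (h : ∀ x ∈ l, x ≤ n) :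
    l.sum ≤ l.length * n := by
  induction l with
  | nil => simp
  | cons a t ih =>
    have := h a (by simp)
    have := ih (fun x hx => h x (by simp [hx]))
    simp only [List.sum_cons, List.length_cons, Nat.succ_mul]
    omega

-- weights
def pvU (chicos : List String) (usados : PySem.Set String) : Nat :=
  (chicos.filter (fun x => !(usados.contains x))).length

def pvW (chicos : List String) (usados : PySem.Set String) : Nat :=
  (chicos.length + 1) ^ pvU chicos usados

def pvWS (chicos : List String) (st : List (List String × PySem.Set String)) : Nat :=
  (st.map (fun s => pvW chicos s.2)).sum

theorem pvLoop_eq (chicos : List String) (enemigos amigos : PySem.Dict String String)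
    (fuel : Nat) :
    ∀ st, pvWS chicos st ≤ fuel →
      pvLoopA chicos enemigos amigos fuel st
        = st.flatMap (fun s => pvRecB chicos enemigos amigos s.1 s.2) := by
  induction fuel with
  | zero =>
    intro st h
    cases st with
    | nil => simp [pvLoopA]
    | cons s t =>
      exfalso
      have : 0 < pvW chicos s.2 := pow_pos (by omega) _
      simp [pvWS] at h
      omega
  | succ fuel ih =>
    intro st h
    cases st with
    | nil => simp [pvLoopA]
    | cons s t =>
      obtain ⟨fila, usados⟩ := s
      have hw : pvWS chicos ((fila, usados) :: t) = pvW chicos usados + pvWS chicos t := by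
        simp [pvWS]
      have hwpos : 0 < pvW chicos usados := pow_pos (by omega) _
      by_cases hlen : fila.length = chicos.length
      · have : pvLoopA chicos enemigos amigos (fuel + 1) ((fila, usados) :: t)
            = fila :: pvLoopA chicos enemigos amigos fuel t := by
          simp [pvLoopA, hlen]
        rw [this, ih t (by omega), List.flatMap_cons,
          pvRecB_complete chicos enemigos amigos fila usados hlen]
        simp
      · -- incomplete row: A pushes the valid candidates, B recurses over them
        have hstep : pvLoopA chicos enemigos amigos (fuel + 1) ((fila, usados) :: t)
            = pvLoopA chicos enemigos amigos fuel
                (((chicos.filter (pvOk enemigos amigos fila usados)).map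
                    (pvMk fila usados)).reverse ++ t) := by
          simp only [pvLoopA, beq_iff_eq, hlen, if_false]
          rw [pvPushA]
        have hsub : ∀ c ∈ chicos.filter (pvOk enemigos amigos fila usados),
            pvU chicos (PySem.Set.union usados [c]) < pvU chicos usados := by
          intro c hc
          obtain ⟨hmem, hok⟩ := List.mem_filter.mp hc
          have hcontains : usados.contains c = false := by
            simp only [pvOk, Bool.and_eq_true, Bool.not_eq_true'] at hok
            exact hok.1
          exact pvFilter_union_lt chicos usados c hmem hcontains
        have hcount : (chicos.filter (pvOk enemigos amigos fila usados)).length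
            ≤ pvU chicos usados := by
          unfold pvU
          apply pvLength_filter_le_filter
          intro a _ hp
          simp only [pvOk, Bool.and_eq_true] at hp
          exact hp.1
        have hnewW : pvWS chicos
              (((chicos.filter (pvOk enemigos amigos fila usados)).map
                  (pvMk fila usados)).reverse ++ t)
            = ((chicos.filter (pvOk enemigos amigos fila usados)).map
                (fun c => pvW chicos (PySem.Set.union usados [c]))).sum + pvWS chicos t := by
          simp [pvWS, pvMk, Function.comp_def]
        have hbound : ((chicos.filter (pvOk enemigos amigos fila usados)).map
              (fun c => pvW chicos (PySem.Set.union usados [c]))).sum + 1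
            ≤ pvW chicos usados := by
          rcases Nat.eq_zero_or_pos (pvU chicos usados) with hu0 | hupos
          · have hnil : chicos.filter (pvOk enemigos amigos fila usados) = [] := by
              have : (chicos.filter (pvOk enemigos amigos fila usados)).length = 0 := by omega
              exact List.eq_nil_of_length_eq_zero this
            simp [hnil, pvW, hu0]
          · have helem : ∀ x ∈ (chicos.filter (pvOk enemigos amigos fila usados)).map
                (fun c => pvW chicos (PySem.Set.union usados [c])),
                x ≤ (chicos.length + 1) ^ (pvU chicos usados - 1) := by
              intro x hx
              obtain ⟨c, hc, rfl⟩ := List.mem_map.mp hx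
              have hlt := hsub c hc
              exact Nat.pow_le_pow_right (by omega) (by omega)
            have hsum := pvSum_le_mul _ _ helem
            rw [List.length_map] at hsum
            have hB : 1 ≤ (chicos.length + 1) ^ (pvU chicos usados - 1) :=
              Nat.one_le_pow _ _ (by omega)
            have hUn : pvU chicos usados ≤ chicos.length := List.length_filter_le _ _
            have hW : pvW chicos usados
                = (chicos.length + 1) ^ (pvU chicos usados - 1) * (chicos.length + 1) := by
              rw [pvW, ← pow_succ]
              congr 1
              omega
            calc ((chicos.filter (pvOk enemigos amigos fila usados)).map
                  (fun c => pvW chicos (PySem.Set.union usados [c]))).sum + 1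
                ≤ (chicos.filter (pvOk enemigos amigos fila usados)).length *
                    (chicos.length + 1) ^ (pvU chicos usados - 1) + 1 := by omega
              _ ≤ chicos.length * (chicos.length + 1) ^ (pvU chicos usados - 1) + 1 := by
                  have : (chicos.filter (pvOk enemigos amigos fila usados)).length
                      ≤ chicos.length := le_trans hcount hUn
                  exact Nat.add_le_add_right (Nat.mul_le_mul_right _ this) 1
              _ ≤ chicos.length * (chicos.length + 1) ^ (pvU chicos usados - 1) +
                    (chicos.length + 1) ^ (pvU chicos usados - 1) := by omega
              _ = (chicos.length + 1) ^ (pvU chicos usados - 1) * (chicos.length + 1) := by ring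
              _ = pvW chicos usados := hW.symm
        rw [hstep, ih _ (by omega)]
        simp only [List.flatMap_append, List.flatMap_cons]
        congr 1
        rw [pvRecB_incomplete chicos enemigos amigos fila usados hlen]
        simp [pvMk, List.flatMap_map, ← List.map_reverse]

-- ===== VERDICT (by name: the statement is the Claim_ definition above) =====
theorem generar_filas_validas_spec : Claim_equal_generar_filas_validas := by
  intro relaciones _
  unfold Spec_generar_filas_validas generar_filas_validas generar_filas_validas_alt
  by_cases he : relaciones.isEmpty
  · simp [he]
  · simp only [he]
    have hbound : pvWS (relaciones.map (fun r => r.1)) [([], PySem.Set.empty)]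
        ≤ pvFuelA (relaciones.map (fun r => r.1)) := by
      simp [pvWS, pvW, pvU, pvFuelA, PySem.Set.empty]
    rw [pvLoop_eq _ _ _ _ _ hbound]
    simp
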